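-- pv_equiv track=rewrite | github.com/L1curry/Kraken2-Scripts | ComKra12_v2.py | determine_ref_taxid_from_out1
-- ===== SOURCE A (Python) =====
-- from collections import Counter
--
-- def determine_ref_taxid_from_out1(kmer_counter: Counter, df1_taxids_set):
--     """From out1 kmer counter pick the taxid that exists in df1 (highest count among those).
--     Return taxid or 'NA'."""
--     if not kmer_counter:
--         return 'NA'
--     # filter keys that are in df1
--     candidates = [(tid, cnt) for tid, cnt in kmer_counter.items() if tid in df1_taxids_set]
--     if not candidates:
--         return 'NA'
--     # pick highest count
--     candidates.sort(key=lambda x: -x[1])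
--     return candidates[0][0]
-- ===== SOURCE B (Python) =====
-- from collections import Counter
--
-- def determine_ref_taxid_from_out1(kmer_counter, df1_taxids_set):
--     """Rank all taxids once with Counter.most_common() (stable descending by count),
--     then return the first ranked taxid present in df1, or 'NA' if none."""
--     for tid, _cnt in Counter(kmer_counter).most_common():
--         if tid in df1_taxids_set:
--             return tid
--     return 'NA'
-- ===== Notes on version B (the rewrite author's own statement) =====
-- stated objective: idiomatic
-- what changed: Instead of filtering to candidates, sorting them and indexing [0], B ranks the whole counter once with most_common() (stable descending order) and returns the first ranked taxid found in df1_taxids_set, with 'NA' as the fall-through.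
import Mathlib
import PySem

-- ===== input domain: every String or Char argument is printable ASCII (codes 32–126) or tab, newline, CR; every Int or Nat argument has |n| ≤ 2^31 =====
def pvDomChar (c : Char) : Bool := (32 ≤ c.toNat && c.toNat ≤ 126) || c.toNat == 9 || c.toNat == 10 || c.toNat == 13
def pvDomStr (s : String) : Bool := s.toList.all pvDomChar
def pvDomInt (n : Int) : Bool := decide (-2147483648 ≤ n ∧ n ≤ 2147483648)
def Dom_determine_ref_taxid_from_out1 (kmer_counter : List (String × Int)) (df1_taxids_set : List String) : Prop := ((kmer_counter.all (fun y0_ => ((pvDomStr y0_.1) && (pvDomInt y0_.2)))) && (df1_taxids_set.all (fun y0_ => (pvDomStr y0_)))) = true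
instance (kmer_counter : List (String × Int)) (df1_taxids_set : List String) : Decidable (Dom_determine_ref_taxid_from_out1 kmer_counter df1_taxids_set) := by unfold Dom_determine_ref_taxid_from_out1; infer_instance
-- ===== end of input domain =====

-- B ranks the whole counter once (most_common, stable descending) and returns the first
-- ranked taxid present in df1, instead of filtering, sorting the candidates and indexing [0].


-- ===== PORT A =====
def determine_ref_taxid_from_out1 (kmer_counter : List (String × Int)) (df1_taxids_set : List String) : String :=
  if kmer_counter = [] then "NA"
  else
    let candidates := kmer_counter.filter (fun kv => df1_taxids_set.contains kv.1)
    if candidates = [] then "NA"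
    else
      -- candidates.sort(key=lambda x: -x[1]) ; return candidates[0][0]
      let candidates := PySem.List.sorted candidates (fun kv => -kv.2) false
      (PySem.List.pyGetD candidates 0 ("", 0)).1

-- ===== PORT B =====
-- the for-loop of Source B: first taxid of the ranked list that is in the set, else 'NA'
def pvFirstIn (df1_taxids_set : List String) : List (String × Int) → String
  | [] => "NA"
  | kv :: rest => if df1_taxids_set.contains kv.1 then kv.1 else pvFirstIn df1_taxids_set rest

def determine_ref_taxid_from_out1_alt (kmer_counter : List (String × Int)) (df1_taxids_set : List String) : String :=
  -- kmer_counter.most_common() = sorted(items, key=itemgetter(1), reverse=True)  (stable)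
  pvFirstIn df1_taxids_set (PySem.List.sorted kmer_counter (fun kv => kv.2) true)

-- ===== PRECONDITION & SPEC =====
def Spec_determine_ref_taxid_from_out1 (kmer_counter : List (String × Int)) (df1_taxids_set : List String) (out : String) : Prop := out = determine_ref_taxid_from_out1_alt kmer_counter df1_taxids_set
instance (kmer_counter : List (String × Int)) (df1_taxids_set : List String) (out : String) : Decidable (Spec_determine_ref_taxid_from_out1 kmer_counter df1_taxids_set out) := by unfold Spec_determine_ref_taxid_from_out1; infer_instance

-- ===== CLAIM (what is proved, stated in full; the proofs are below) =====
def Claim_equal_determine_ref_taxid_from_out1 : Prop := ∀ (kmer_counter : List (String × Int)) (df1_taxids_set : List String), Dom_determine_ref_taxid_from_out1 kmer_counter df1_taxids_set → Spec_determine_ref_taxid_from_out1 kmer_counter df1_taxids_set (determine_ref_taxid_from_out1 kmer_counter df1_taxids_set)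

-- ===== LEMMAS AND PROOFS =====

-- the two sorts are the same list: key -cnt ascending = key cnt descending
theorem pv_sort_neg_eq_sort_rev (xs : List (String × Int)) :
    PySem.List.sorted xs (fun kv => -kv.2) false = PySem.List.sorted xs (fun kv => kv.2) true := by
  rw [PySem.List.sorted_eq_foldl_insertBy, PySem.List.sorted_rev_eq_foldl_insertBy]
  simp only [neg_lt_neg_iff]

-- insertBy with the descending-count comparison preserves a count-descending list
theorem pv_insertBy_pairwise (x : String × Int) (ys : List (String × Int))
    (h : ys.Pairwise (fun a b => b.2 ≤ a.2)) :
    (PySem.List.insertBy (fun a b => decide (b.2 < a.2)) x ys).Pairwise (fun a b => b.2 ≤ a.2) := by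
  induction ys with
  | nil => simp [PySem.List.insertBy]
  | cons y ys ih =>
    rw [List.pairwise_cons] at h
    by_cases hb : y.2 < x.2
    · have hstep : PySem.List.insertBy (fun a b => decide (b.2 < a.2)) x (y :: ys) = x :: y :: ys := by
        simp [PySem.List.insertBy, hb]
      rw [hstep]
      refine List.pairwise_cons.2 ⟨?_, List.pairwise_cons.2 h⟩
      intro z hz
      rcases List.mem_cons.1 hz with h1 | h1
      · subst h1; omega
      · have := h.1 z h1; omega
    · have hstep : PySem.List.insertBy (fun a b => decide (b.2 < a.2)) x (y :: ys) =
          y :: PySem.List.insertBy (fun a b => decide (b.2 < a.2)) x ys := by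
        simp [PySem.List.insertBy, hb]
      rw [hstep]
      refine List.pairwise_cons.2 ⟨?_, ih h.2⟩
      intro z hz
      rcases (PySem.List.mem_insertBy _ _ _ _).1 hz with h1 | h1
      · subst h1; omega
      · exact h.1 z h1

-- filtering commutes with inserting into a count-descending list
theorem pv_filter_insertBy (p : String × Int → Bool) (x : String × Int) (ys : List (String × Int))
    (h : ys.Pairwise (fun a b => b.2 ≤ a.2)) :
    (PySem.List.insertBy (fun a b => decide (b.2 < a.2)) x ys).filter p =
      if p x then PySem.List.insertBy (fun a b => decide (b.2 < a.2)) x (ys.filter p)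
      else ys.filter p := by
  -- x is inserted at the head of any list whose elements all have count < x's
  have hins : ∀ l : List (String × Int), (∀ z ∈ l, z.2 < x.2) →
      PySem.List.insertBy (fun a b => decide (b.2 < a.2)) x l = x :: l := by
    intro l hl
    cases l with
    | nil => simp [PySem.List.insertBy]
    | cons z t => simp [PySem.List.insertBy, hl z (by simp)]
  induction ys with
  | nil =>
    rw [hins [] (by simp)]
    by_cases hx : p x
    · rw [if_pos hx]; simp [PySem.List.insertBy, List.filter, hx]
    · rw [if_neg hx]; simp [List.filter, hx]
  | cons y ys ih =>
    rw [List.pairwise_cons] at h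
    by_cases hb : y.2 < x.2
    · have hstep : PySem.List.insertBy (fun a b => decide (b.2 < a.2)) x (y :: ys) = x :: y :: ys := by
        simp [PySem.List.insertBy, hb]
      rw [hstep]
      by_cases hx : p x
      · have hlt : ∀ z ∈ (y :: ys).filter p, z.2 < x.2 := by
          intro z hz
          rcases List.mem_cons.1 (List.mem_filter.1 hz).1 with h1 | h1
          · subst h1; exact hb
          · have := h.1 z h1; omega
        rw [List.filter_cons_of_pos hx, if_pos hx, hins _ hlt]
      · rw [List.filter_cons_of_neg (by simp [hx]), if_neg (by simp [hx])]
    · have hstep : PySem.List.insertBy (fun a b => decide (b.2 < a.2)) x (y :: ys) =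
          y :: PySem.List.insertBy (fun a b => decide (b.2 < a.2)) x ys := by
        simp [PySem.List.insertBy, hb]
      rw [hstep]
      by_cases hy : p y
      · rw [List.filter_cons_of_pos hy, List.filter_cons_of_pos hy, ih h.2]
        by_cases hx : p x
        · have : PySem.List.insertBy (fun a b => decide (b.2 < a.2)) x (y :: ys.filter p) =
              y :: PySem.List.insertBy (fun a b => decide (b.2 < a.2)) x (ys.filter p) := by
            simp [PySem.List.insertBy, hb]
          rw [if_pos hx, if_pos hx, this]
        · rw [if_neg (by simp [hx]), if_neg (by simp [hx])]
      · rw [List.filter_cons_of_neg (by simp [hy]), List.filter_cons_of_neg (by simp [hy]), ih h.2]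

-- filtering commutes with the whole insertion-sort fold
theorem pv_filter_foldl (p : String × Int → Bool) (xs acc : List (String × Int))
    (h : acc.Pairwise (fun a b => b.2 ≤ a.2)) :
    (xs.foldl (fun acc x => PySem.List.insertBy (fun a b => decide (b.2 < a.2)) x acc) acc).filter p =
      (xs.filter p).foldl (fun acc x => PySem.List.insertBy (fun a b => decide (b.2 < a.2)) x acc) (acc.filter p) := by
  induction xs generalizing acc with
  | nil => simp
  | cons x xs ih =>
    rw [List.foldl_cons, ih _ (pv_insertBy_pairwise x acc h), pv_filter_insertBy p x acc h]
    by_cases hx : p x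
    · rw [List.filter_cons_of_pos hx, if_pos hx, List.foldl_cons]
    · rw [List.filter_cons_of_neg (by simp [hx]), if_neg (by simp [hx])]

-- sorted-descending commutes with filter
theorem pv_filter_sorted (p : String × Int → Bool) (xs : List (String × Int)) :
    (PySem.List.sorted xs (fun kv => kv.2) true).filter p =
      PySem.List.sorted (xs.filter p) (fun kv => kv.2) true := by
  rw [PySem.List.sorted_rev_eq_foldl_insertBy, PySem.List.sorted_rev_eq_foldl_insertBy]
  simpa using pv_filter_foldl p xs [] (by simp)

-- the B loop is the head of the filtered list
theorem pv_firstIn_eq (s : List String) (l : List (String × Int)) :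
    pvFirstIn s l =
      match (l.filter (fun kv => s.contains kv.1)).head? with
      | some kv => kv.1
      | none => "NA" := by
  induction l with
  | nil => rfl
  | cons kv rest ih =>
    by_cases hc : kv.1 ∈ s
    · simp [pvFirstIn, hc]
    · simp [pvFirstIn, hc, ih]

-- ===== VERDICT (by name: the statement is the Claim_ definition above) =====
theorem determine_ref_taxid_from_out1_spec : Claim_equal_determine_ref_taxid_from_out1 := by
  intro xs s _
  unfold Spec_determine_ref_taxid_from_out1
  simp only [determine_ref_taxid_from_out1, determine_ref_taxid_from_out1_alt]
  rw [pv_firstIn_eq, pv_filter_sorted]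
  by_cases h0 : xs = []
  · subst h0; rw [if_pos rfl]; rfl
  · rw [if_neg h0]
    by_cases hc : xs.filter (fun kv => s.contains kv.1) = []
    · rw [if_pos hc, hc]; rfl
    · rw [if_neg hc, pv_sort_neg_eq_sort_rev]
      rcases hs : PySem.List.sorted (xs.filter (fun kv => s.contains kv.1)) (fun kv => kv.2) true with _ | ⟨c, t⟩
      · exact absurd ((PySem.List.sorted_eq_nil_iff _ _ _).1 hs) hc
      · rw [hs, PySem.List.pyGetD_zero_cons]
        rfl
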